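-- pv_equiv track=rewrite | github.com/yuxin101/skills | skills/gooderno1/larksync-feishu-local-cache/scripts/larksync_wsl_helper.py | _find_command_index
-- ===== SOURCE A (Python) =====
-- KNOWN_COMMANDS = {
--     "check",
--     "configure-download",
--     "create-task",
--     "run-task",
--     "bootstrap-daily",
-- }
--
-- def _find_command_index(args: list[str]) -> int:
--     for index, arg in enumerate(args):
--         if arg in KNOWN_COMMANDS:
--             return index
--     for index, arg in enumerate(args):
--         if not arg.startswith("-"):
--             return index
--     return len(args)
-- ===== SOURCE B (Python) =====
-- KNOWN_COMMANDS = {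
--     "check",
--     "configure-download",
--     "create-task",
--     "run-task",
--     "bootstrap-daily",
-- }
--
-- def _find_command_index(args):
--     first_non_option = None
--     for index, arg in enumerate(args):
--         if arg in KNOWN_COMMANDS:
--             return index
--         if first_non_option is None and not arg.startswith("-"):
--             first_non_option = index
--     return first_non_option if first_non_option is not None else len(args)
-- ===== Notes on version B (the rewrite author's own statement) =====
-- stated objective: alternative
-- what changed: Replaces A's two sequential enumerate passes with a single pass that returns a known command immediately and records (without returning) the first non-option index as fallback.
import Mathlib
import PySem

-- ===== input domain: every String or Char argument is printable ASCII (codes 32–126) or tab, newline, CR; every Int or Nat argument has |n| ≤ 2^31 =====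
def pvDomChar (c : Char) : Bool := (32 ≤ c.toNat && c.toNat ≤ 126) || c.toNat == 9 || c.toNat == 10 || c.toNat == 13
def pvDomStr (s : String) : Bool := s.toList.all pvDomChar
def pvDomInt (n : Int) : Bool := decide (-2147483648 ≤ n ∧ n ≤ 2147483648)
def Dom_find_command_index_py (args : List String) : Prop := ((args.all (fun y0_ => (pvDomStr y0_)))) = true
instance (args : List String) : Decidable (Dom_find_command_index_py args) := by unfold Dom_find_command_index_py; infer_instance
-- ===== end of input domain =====

-- B merges A's two enumerate passes into a single pass that records the first
-- non-option index as a fallback; same O(n) cost, one traversal instead of two.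

-- ===== PORT A =====
-- module constant KNOWN_COMMANDS (a Python set)
def pvKnownCommands : PySem.Set String :=
  PySem.Set.ofList ["check", "configure-download", "create-task", "run-task", "bootstrap-daily"]

-- first loop of A: first index whose element is in KNOWN_COMMANDS
def pvALoop1 : List String → Nat → Option Nat
  | [], _ => none
  | a :: rest, i =>
    if PySem.Set.contains pvKnownCommands a then some i else pvALoop1 rest (i + 1)

-- second loop of A: first index whose element does not start with "-"
def pvALoop2 : List String → Nat → Option Nat
  | [], _ => none
  | a :: rest, i =>
    if !(PySem.Str.startswith a "-") then some i else pvALoop2 rest (i + 1)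

def find_command_index_py (args : List String) : Int :=
  match pvALoop1 args 0 with
  | some i => (i : Int)
  | none =>
    match pvALoop2 args 0 with
    | some i => (i : Int)
    | none => (args.length : Int)

-- ===== PORT B =====
-- single loop of B: `found` is the recorded first non-option index (None at start);
-- at the end of the list the running index equals len(args)
def pvBLoop : List String → Nat → Option Nat → Int
  | [], i, found =>
    match found with
    | some f => (f : Int)
    | none => (i : Int)
  | a :: rest, i, found =>
    if PySem.Set.contains pvKnownCommands a then (i : Int)
    else
      pvBLoop rest (i + 1)
        (if found.isNone && !(PySem.Str.startswith a "-") then some i else found)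

def find_command_index_py_alt (args : List String) : Int :=
  pvBLoop args 0 none

-- ===== PRECONDITION & SPEC =====
def Spec_find_command_index_py (args : List String) (out : Int) : Prop := out = find_command_index_py_alt args
instance (args : List String) (out : Int) : Decidable (Spec_find_command_index_py args out) := by unfold Spec_find_command_index_py; infer_instance

-- ===== CLAIM (what is proved, stated in full; the proofs are below) =====
def Claim_equal_find_command_index_py : Prop := ∀ (args : List String), Dom_find_command_index_py args → Spec_find_command_index_py args (find_command_index_py args)

-- ===== LEMMAS AND PROOFS =====

-- B's single loop equals A's two-pass composition, generalized over the running
-- index and the recorded fallback.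
theorem pvBLoop_eq (l : List String) : ∀ (i : Nat) (found : Option Nat),
    pvBLoop l i found =
      match pvALoop1 l i with
      | some j => (j : Int)
      | none =>
        match found with
        | some f => (f : Int)
        | none =>
          match pvALoop2 l i with
          | some j => (j : Int)
          | none => ((i + l.length : Nat) : Int) := by
  induction l with
  | nil => intro i found; cases found <;> simp [pvBLoop, pvALoop1, pvALoop2]
  | cons a rest ih =>
    intro i found
    by_cases hk : a ∈ pvKnownCommands
    · simp [pvBLoop, pvALoop1, hk]
    · by_cases hs : PySem.Chars.startswith a.toList ['-'] = false
      · cases found <;> simp [pvBLoop, pvALoop1, pvALoop2, hk, hs, ih]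
      · cases found <;> simp [pvBLoop, pvALoop1, pvALoop2, hk, hs, ih, add_assoc, add_comm, add_left_comm]

-- ===== VERDICT (by name: the statement is the Claim_ definition above) =====
theorem find_command_index_py_spec : Claim_equal_find_command_index_py := by
  intro args _
  unfold Spec_find_command_index_py find_command_index_py find_command_index_py_alt
  rw [pvBLoop_eq]
  cases h1 : pvALoop1 args 0 <;> cases h2 : pvALoop2 args 0 <;> simp
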